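-- pv_equiv track=rewrite | github.com/facebookresearch/PrivacyGuard | privacy_guard/analysis/extraction/text_inclusion_analysis_node.py | _char_level_longest_common_substring_helper_bound
-- ===== SOURCE A (Python) =====
-- def _char_level_longest_common_substring_helper_bound(
--     s1: str, s2: str, target: int = 150
-- ) -> int:
--     """
--     To save on computation, check existance of a common substring of length target.
--     Different from longest common subsequence (commonly known as LCS), longest common substring is the longest common CONSECUTIVE subsequence. Please use with caution.
--     """
--
--     max_length = 0
--     # Iterate over the characters in the first string
--     for i in range(len(s1)):
--         j = target
--
--         substring = s1[i : i + j]
--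
--         # Check if the current substring is in the second string and is longer
--         # than the previous longest substring
--         if substring in s2 and len(substring) > max_length:
--             # Update the longest substring and its length
--             max_length = len(substring)
--
--             if max_length >= target:
--                 return max_length
--
--     return 0
-- ===== SOURCE B (Python) =====
-- def _char_level_longest_common_substring_helper_bound(
--     s1: str, s2: str, target: int = 150
-- ) -> int:
--     # Hash-set of s2's length-target windows; scan s1's windows once.
--     if target <= 0 or len(s1) < target or len(s2) < target:
--         return 0
--     windows = set()
--     for j in range(len(s2) - target + 1):
--         windows.add(s2[j : j + target])
--     for i in range(len(s1) - target + 1):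
--         if s1[i : i + target] in windows:
--             return target
--     return 0
-- ===== Notes on version B (the rewrite author's own statement) =====
-- stated objective: faster
-- what changed: A tests each of s1's length-target slices with a full substring scan of s2 ('sub in s2'); B builds a hash set of s2's length-target windows once and probes each s1 window against it, with a cheap length/sign guard up front.
-- intended difference: For target < 0 with len(s1)+target >= 1 and one of the first -target windows of length len(s1)+target occurring in s2, Python slice wraparound makes A return the accidental length len(s1)+target; B returns 0, the intended answer for a non-positive requested length. — e.g. on _char_level_longest_common_substring_helper_bound("ab", "a", -1): A returns 1, B returns 0
import Mathlib
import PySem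

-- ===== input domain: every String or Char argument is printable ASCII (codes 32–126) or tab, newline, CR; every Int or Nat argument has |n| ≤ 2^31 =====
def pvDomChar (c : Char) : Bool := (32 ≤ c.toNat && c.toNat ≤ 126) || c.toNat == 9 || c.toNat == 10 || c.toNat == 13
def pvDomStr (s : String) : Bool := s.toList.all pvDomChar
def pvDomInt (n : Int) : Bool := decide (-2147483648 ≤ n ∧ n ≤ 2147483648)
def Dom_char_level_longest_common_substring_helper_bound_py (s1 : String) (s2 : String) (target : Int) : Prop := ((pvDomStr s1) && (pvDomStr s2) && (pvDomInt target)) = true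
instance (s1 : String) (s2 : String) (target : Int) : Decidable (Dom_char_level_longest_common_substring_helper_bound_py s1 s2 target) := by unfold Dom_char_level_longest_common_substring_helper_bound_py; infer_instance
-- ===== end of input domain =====

-- B replaces A's per-position scan of s2 (substring `in` test for every i) by a set of s2's
-- length-target windows probed once per s1 window; equivalence is proved outside D_ below,
-- where A's negative-target slice wraparound makes A return an accidental positive length.

-- ===== PORT A =====
-- the 'for i in range(len(s1))' loop with accumulator max_length and early return
def pvLoopA (s1 s2 : List Char) (target : Int) : List Int → Int → Int
  | [], _ => 0
  | i :: rest, maxLen =>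
    let sub := PySem.List.slice s1 (some i) (some (i + target))
    if PySem.Chars.isIn sub s2 && decide (maxLen < (sub.length : Int)) then
      if target ≤ (sub.length : Int) then (sub.length : Int)
      else pvLoopA s1 s2 target rest (sub.length : Int)
    else pvLoopA s1 s2 target rest maxLen

def char_level_longest_common_substring_helper_bound_py (s1 : String) (s2 : String) (target : Int) : Int :=
  pvLoopA s1.toList s2.toList target (PySem.List.pyRange 0 (s1.toList.length : Int)) 0

-- ===== PORT B =====
-- set of s2's length-target windows (the first 'for j' loop of Source B)
def pvWindows (l : List Char) (target : Int) : PySem.Set (List Char) :=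
  (PySem.List.pyRange 0 ((l.length : Int) - target + 1)).foldl
    (fun s j => PySem.Set.add s (PySem.List.slice l (some j) (some (j + target)))) PySem.Set.empty

def char_level_longest_common_substring_helper_bound_py_alt (s1 : String) (s2 : String) (target : Int) : Int :=
  let t1 := s1.toList
  let t2 := s2.toList
  if target ≤ 0 ∨ (t1.length : Int) < target ∨ (t2.length : Int) < target then 0
  else
    let windows := pvWindows t2 target
    if (PySem.List.pyRange 0 ((t1.length : Int) - target + 1)).any
        (fun i => PySem.Set.contains windows (PySem.List.slice t1 (some i) (some (i + target)))) then
      target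
    else 0

-- ===== PRECONDITION & SPEC =====
-- For negative target, A's slice s1[i:i+target] wraps to a negative stop index, so A returns the
-- accidental length len(s1)+target whenever one of the first -target windows of that length occurs
-- in s2; B returns 0 there, the intended answer for a non-positive requested length.
def D_char_level_longest_common_substring_helper_bound_py (s1 : String) (s2 : String) (target : Int) : Prop :=
  target < 0 ∧ 1 ≤ (s1.toList.length : Int) + target ∧
  ∃ i < (-target).toNat,
    (s1.toList.drop i).take ((s1.toList.length : Int) + target).toNat <:+: s2.toList
instance (s1 : String) (s2 : String) (target : Int) : Decidable (D_char_level_longest_common_substring_helper_bound_py s1 s2 target) := by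
  unfold D_char_level_longest_common_substring_helper_bound_py; infer_instance

def Spec_char_level_longest_common_substring_helper_bound_py (s1 : String) (s2 : String) (target : Int) (out : Int) : Prop := ¬ D_char_level_longest_common_substring_helper_bound_py s1 s2 target → out = char_level_longest_common_substring_helper_bound_py_alt s1 s2 target
instance (s1 : String) (s2 : String) (target : Int) (out : Int) : Decidable (Spec_char_level_longest_common_substring_helper_bound_py s1 s2 target out) := by unfold Spec_char_level_longest_common_substring_helper_bound_py; infer_instance

def pvDiffWitness_char_level_longest_common_substring_helper_bound_py : String × String × Int := ("ab", "a", -1)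
def pvDiffWitnessOut_char_level_longest_common_substring_helper_bound_py : Int × Int := (1, 0)

-- ===== CLAIM (what is proved, stated in full; the proofs are below) =====
def Claim_unchanged_char_level_longest_common_substring_helper_bound_py : Prop := ∀ (s1 : String) (s2 : String) (target : Int), Dom_char_level_longest_common_substring_helper_bound_py s1 s2 target → Spec_char_level_longest_common_substring_helper_bound_py s1 s2 target (char_level_longest_common_substring_helper_bound_py s1 s2 target)
def Claim_changed_char_level_longest_common_substring_helper_bound_py : Prop := Dom_char_level_longest_common_substring_helper_bound_py (pvDiffWitness_char_level_longest_common_substring_helper_bound_py.1) (pvDiffWitness_char_level_longest_common_substring_helper_bound_py.2.1) (pvDiffWitness_char_level_longest_common_substring_helper_bound_py.2.2) ∧ D_char_level_longest_common_substring_helper_bound_py (pvDiffWitness_char_level_longest_common_substring_helper_bound_py.1) (pvDiffWitness_char_level_longest_common_substring_helper_bound_py.2.1) (pvDiffWitness_char_level_longest_common_substring_helper_bound_py.2.2) ∧ char_level_longest_common_substring_helper_bound_py (pvDiffWitness_char_level_longest_common_substring_helper_bound_py.1) (pvDiffWitness_char_level_longest_common_substring_helper_bound_py.2.1) (pvDiffWitness_char_level_longest_common_substring_helper_bound_py.2.2)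 = pvDiffWitnessOut_char_level_longest_common_substring_helper_bound_py.1 ∧ char_level_longest_common_substring_helper_bound_py_alt (pvDiffWitness_char_level_longest_common_substring_helper_bound_py.1) (pvDiffWitness_char_level_longest_common_substring_helper_bound_py.2.1) (pvDiffWitness_char_level_longest_common_substring_helper_bound_py.2.2) = pvDiffWitnessOut_char_level_longest_common_substring_helper_bound_py.2 ∧ pvDiffWitnessOut_char_level_longest_common_substring_helper_bound_py.1 ≠ pvDiffWitnessOut_char_level_longest_common_substring_helper_bound_py.2
def Claim_exact_char_level_longest_common_substring_helper_bound_py : Prop := ∀ (s1 : String) (s2 : String) (target : Int), Dom_char_level_longest_common_substring_helper_bound_py s1 s2 target → D_char_level_longest_common_substring_helper_bound_py s1 s2 target → char_level_longest_common_substring_helper_bound_py s1 s2 target ≠ char_level_longest_common_substring_helper_bound_py_alt s1 s2 target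

-- ===== LEMMAS AND PROOFS =====

-- slice s1[i:i+target] for 0 ≤ i, 0 ≤ target
lemma pvSlicePos {α : Type} (l : List α) (i target : Int) (hi : 0 ≤ i) (ht : 0 ≤ target) :
    PySem.List.slice l (some i) (some (i + target)) = (l.drop i.toNat).take target.toNat := by
  rw [PySem.List.slice_toNat l hi (by omega)]; congr 1; omega

-- slice s1[i:i+target] when the stop wraps below the start: empty
lemma pvSliceNegEmpty {α : Type} (l : List α) (i target : Int) (hi : 0 ≤ i)
    (hneg : i + target < 0) (hL : (l.length : Int) + target ≤ 0) :
    PySem.List.slice l (some i) (some (i + target)) = [] := by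
  simp only [PySem.List.slice, PySem.List.clampIdx]
  split_ifs with h1 h2 h3 <;> simp_all <;> omega

-- slice s1[i:i+target] with a wrapped stop and positive effective length len+target
lemma pvSliceNegFull {α : Type} (l : List α) (i target : Int) (hi : 0 ≤ i)
    (hneg : i + target < 0) (hL : 1 ≤ (l.length : Int) + target) :
    PySem.List.slice l (some i) (some (i + target)) =
      (l.drop i.toNat).take ((l.length : Int) + target).toNat := by
  simp only [PySem.List.slice, PySem.List.clampIdx]
  split_ifs with h1 h2 h3 <;> first
  | omega
  | (rw [show min i.toNat l.length = i.toNat from by omega]; congr 1; omega)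

lemma pvSliceNat (l : List Char) (target : Int) (k : Nat) (ht : 0 ≤ target) :
    PySem.List.slice l (some (k : Int)) (some ((k : Int) + target)) =
      (l.drop k).take target.toNat := by
  rw [pvSlicePos l k target (Int.natCast_nonneg k) ht, Int.toNat_natCast]

lemma pvWindowLen {α : Type} (l : List α) (j t : Nat) (h : j + t ≤ l.length) :
    ((l.drop j).take t).length = t := by
  simp [List.length_take, List.length_drop]; omega

-- a fixed-length sublist is an infix iff it is one of the windows of that length
lemma pvInfixWindow (sub s2 : List Char) (t : Nat) (hlen : sub.length = t) :
    (sub <:+: s2) ↔ ∃ j : Nat, j + t ≤ s2.length ∧ sub = (s2.drop j).take t := by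
  constructor
  · rintro ⟨pre, post, rfl⟩
    refine ⟨pre.length, by simp; omega, ?_⟩
    rw [List.append_assoc, List.drop_left, ← hlen, List.take_left]
  · rintro ⟨j, hj, rfl⟩
    exact ((s2.drop j).take_prefix t).isInfix.trans (s2.drop_suffix j).isInfix

-- characterisation of A's loop for target ≥ 1
lemma pvLoopAPos (s1 s2 : List Char) (target : Int) (ht : 1 ≤ target) (idxs : List Int)
    (hidx : ∀ i ∈ idxs, 0 ≤ i) (maxLen : Int) (h0 : 0 ≤ maxLen) (h1 : maxLen < target) :
    pvLoopA s1 s2 target idxs maxLen =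
      if ∃ i ∈ idxs, i.toNat + target.toNat ≤ s1.length ∧
          (s1.drop i.toNat).take target.toNat <:+: s2 then target else 0 := by
  induction idxs generalizing maxLen with
  | nil => simp [pvLoopA]
  | cons i rest ih =>
    have hi : 0 ≤ i := hidx i (by simp)
    have hrest : ∀ x ∈ rest, 0 ≤ x := fun x hx => hidx x (by simp [hx])
    rw [pvLoopA]
    simp only [pvSlicePos s1 i target hi (by omega), Bool.and_eq_true, decide_eq_true_iff,
      PySem.Chars.isIn_iff_infix, List.mem_cons, exists_eq_or_imp]
    set sub := (s1.drop i.toNat).take target.toNat with hsub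
    have hlsub : sub.length = min target.toNat (s1.length - i.toNat) := by simp [hsub]
    by_cases hinf : sub <:+: s2
    · by_cases hfull : i.toNat + target.toNat ≤ s1.length
      · have hlen : sub.length = target.toNat := by omega
        rw [if_pos ⟨hinf, by rw [hlen]; omega⟩, if_pos (by rw [hlen]; omega),
          if_pos (Or.inl ⟨hfull, hinf⟩), hlen]
        omega
      · have hPi : ¬(i.toNat + target.toNat ≤ s1.length ∧ sub <:+: s2) := fun h => hfull h.1
        have hlt : (sub.length : Int) < target := by omega
        by_cases hml : maxLen < (sub.length : Int)
        · rw [if_pos ⟨hinf, hml⟩, if_neg (by omega), ih hrest _ (by positivity) hlt]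
          exact if_congr (or_iff_right hPi).symm rfl rfl
        · rw [if_neg (fun h => hml h.2), ih hrest maxLen h0 h1]
          exact if_congr (or_iff_right hPi).symm rfl rfl
    · have hPi : ¬(i.toNat + target.toNat ≤ s1.length ∧ sub <:+: s2) := fun h => hinf h.2
      rw [if_neg (fun h => hinf h.1), ih hrest maxLen h0 h1]
      exact if_congr (or_iff_right hPi).symm rfl rfl

-- A's loop returns 0 for target = 0
lemma pvLoopAZero (s1 s2 : List Char) (idxs : List Int) (hidx : ∀ i ∈ idxs, 0 ≤ i) :
    pvLoopA s1 s2 0 idxs 0 = 0 := by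
  induction idxs with
  | nil => simp [pvLoopA]
  | cons i rest ih =>
    have hi : 0 ≤ i := hidx i (by simp)
    rw [pvLoopA]
    rw [show PySem.List.slice s1 (some i) (some (i + 0)) = (s1.drop i.toNat).take (0:Int).toNat from
      pvSlicePos s1 i 0 hi le_rfl]
    simp only [Int.toNat_zero, List.take_zero, List.length_nil, Nat.cast_zero, lt_irrefl,
      decide_false, Bool.and_false, Bool.false_eq_true, if_false]
    exact ih (fun x hx => hidx x (by simp [hx]))

-- characterisation of A's loop for target < 0 (wrapped slices)
lemma pvLoopANeg (s1 s2 : List Char) (target : Int) (ht : target < 0) (idxs : List Int)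
    (hidx : ∀ i ∈ idxs, 0 ≤ i) :
    pvLoopA s1 s2 target idxs 0 =
      if 1 ≤ (s1.length : Int) + target ∧ ∃ i ∈ idxs, i < -target ∧
          (s1.drop i.toNat).take ((s1.length : Int) + target).toNat <:+: s2
      then (s1.length : Int) + target else 0 := by
  induction idxs with
  | nil => simp [pvLoopA]
  | cons i rest ih =>
    have hi : 0 ≤ i := hidx i (by simp)
    have hrest : ∀ x ∈ rest, 0 ≤ x := fun x hx => hidx x (by simp [hx])
    rw [pvLoopA]
    by_cases hL : 1 ≤ (s1.length : Int) + target
    · by_cases hneg : i + target < 0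
      · rw [pvSliceNegFull s1 i target hi hneg hL]
        set sub := (s1.drop i.toNat).take ((s1.length : Int) + target).toNat with hsub
        have hlen : sub.length = ((s1.length : Int) + target).toNat := by
          simp [hsub]; omega
        simp only [Bool.and_eq_true, decide_eq_true_iff, PySem.Chars.isIn_iff_infix,
          List.mem_cons, exists_eq_or_imp]
        by_cases hinf : sub <:+: s2
        · rw [if_pos ⟨hinf, by rw [hlen]; omega⟩, if_pos (by rw [hlen]; omega),
            if_pos ⟨hL, Or.inl ⟨by omega, hinf⟩⟩, hlen]
          omega
        · rw [if_neg (fun h => hinf h.1), ih hrest]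
          have hPi : ¬((i < -target) ∧ sub <:+: s2) := fun h => hinf h.2
          exact if_congr (and_congr_right fun _ => (or_iff_right hPi).symm) rfl rfl
      · have hempty : PySem.List.slice s1 (some i) (some (i + target)) = [] := by
          rw [PySem.List.slice_toNat s1 hi (by omega),
            show ((i + target).toNat - i.toNat) = 0 from by omega, List.take_zero]
        rw [hempty]
        simp only [List.length_nil, Nat.cast_zero, lt_irrefl, decide_false, Bool.and_false,
          Bool.false_eq_true, if_false]
        rw [ih hrest]
        have hPi : ¬((i < -target) ∧
            (s1.drop i.toNat).take ((s1.length : Int) + target).toNat <:+: s2) :=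
          fun h => by omega
        simp only [List.mem_cons, exists_eq_or_imp]
        exact if_congr (and_congr_right fun _ => (or_iff_right hPi).symm) rfl rfl
    · have hempty : PySem.List.slice s1 (some i) (some (i + target)) = [] := by
        by_cases hneg : i + target < 0
        · exact pvSliceNegEmpty s1 i target hi hneg (by omega)
        · rw [PySem.List.slice_toNat s1 hi (by omega),
            show ((i + target).toNat - i.toNat) = 0 from by omega, List.take_zero]
      rw [hempty]
      simp only [List.length_nil, Nat.cast_zero, lt_irrefl, decide_false, Bool.and_false,
        Bool.false_eq_true, if_false]
      rw [ih hrest]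
      rw [if_neg (fun h => hL h.1), if_neg (fun h => hL h.1)]

lemma pvFoldAdd {α β : Type} [BEq α] (f : β → α) (xs : List β) :
    xs.foldl (fun s j => PySem.Set.add s (f j)) PySem.Set.empty =
      PySem.Set.ofList (xs.map f) := by
  rw [PySem.Set.ofList_eq_foldl, List.foldl_map]; rfl

-- membership in B's window set
lemma pvWindowsMem (l : List Char) (target : Int) (ht : 1 ≤ target) (hlen : target ≤ (l.length : Int))
    (sub : List Char) :
    PySem.Set.contains (pvWindows l target) sub = true ↔
      ∃ j : Nat, j + target.toNat ≤ l.length ∧ sub = (l.drop j).take target.toNat := by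
  have hbound : (l.length : Int) - target + 1 = ((l.length - target.toNat + 1 : Nat) : Int) := by
    push_cast; omega
  rw [pvWindows, pvFoldAdd (fun j => PySem.List.slice l (some j) (some (j + target))),
    PySem.Set.contains_iff, PySem.Set.mem_ofList, hbound, PySem.List.pyRange_zero_natCast,
    List.map_map, List.mem_map]
  constructor
  · rintro ⟨k, hk, rfl⟩
    rw [List.mem_range] at hk
    exact ⟨k, by omega, by rw [Function.comp_apply, pvSliceNat l target k (by omega)]⟩
  · rintro ⟨j, hj, rfl⟩
    exact ⟨j, List.mem_range.mpr (by omega),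
      by rw [Function.comp_apply, pvSliceNat l target j (by omega)]⟩

theorem char_level_longest_common_substring_helper_bound_py_spec : Claim_unchanged_char_level_longest_common_substring_helper_bound_py := by
  intro s1 s2 target _ hD
  unfold char_level_longest_common_substring_helper_bound_py
    char_level_longest_common_substring_helper_bound_py_alt
  set l1 := s1.toList with hl1
  set l2 := s2.toList with hl2
  have hidx : ∀ i ∈ PySem.List.pyRange 0 (l1.length : Int), 0 ≤ i :=
    fun i hi => (PySem.List.mem_pyRange_one.mp hi).1
  rcases lt_trichotomy target 0 with hneg | rfl | hpos
  · rw [pvLoopANeg l1 l2 target hneg _ hidx, if_pos (Or.inl (le_of_lt hneg)),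
      if_neg ?_]
    rintro ⟨hL, i, hmem, hlt, hinf⟩
    have hi0 : 0 ≤ i := hidx i hmem
    exact hD ⟨hneg, hL, i.toNat, by omega, hinf⟩
  · rw [pvLoopAZero l1 l2 _ hidx, if_pos (Or.inl le_rfl)]
  · rw [pvLoopAPos l1 l2 target (by omega) _ hidx 0 le_rfl (by omega)]
    by_cases hguard : (l1.length : Int) < target ∨ (l2.length : Int) < target
    · rw [if_pos (Or.inr hguard), if_neg ?_]
      rintro ⟨i, _, hfull, hinf⟩
      have h2 : target.toNat ≤ l2.length := by
        have := hinf.length_le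
        rw [pvWindowLen l1 i.toNat target.toNat hfull] at this
        exact this
      rcases hguard with h | h <;> omega
    · push Not at hguard
      obtain ⟨hn, hm⟩ := hguard
      rw [if_neg (show ¬(target ≤ 0 ∨ (l1.length : Int) < target ∨ (l2.length : Int) < target)
        from by push Not; exact ⟨by omega, hn, hm⟩)]
      refine if_congr ?_ rfl rfl
      rw [List.any_eq_true]
      constructor
      · rintro ⟨i, hmem, hfull, hinf⟩
        obtain ⟨hi0, hin⟩ := PySem.List.mem_pyRange_one.mp hmem
        refine ⟨i, PySem.List.mem_pyRange_one.mpr ⟨hi0, by omega⟩, ?_⟩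
        rw [pvSlicePos l1 i target hi0 (by omega),
          pvWindowsMem l2 target (by omega) hm]
        exact (pvInfixWindow _ l2 target.toNat
          (pvWindowLen l1 i.toNat target.toNat hfull)).mp hinf
      · rintro ⟨i, hmem, hp⟩
        obtain ⟨hi0, hin⟩ := PySem.List.mem_pyRange_one.mp hmem
        have hfull : i.toNat + target.toNat ≤ l1.length := by omega
        rw [pvSlicePos l1 i target hi0 (by omega),
          pvWindowsMem l2 target (by omega) hm] at hp
        refine ⟨i, PySem.List.mem_pyRange_one.mpr ⟨hi0, by omega⟩, hfull, ?_⟩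
        exact (pvInfixWindow _ l2 target.toNat
          (pvWindowLen l1 i.toNat target.toNat hfull)).mpr hp

theorem char_level_longest_common_substring_helper_bound_py_tight : Claim_exact_char_level_longest_common_substring_helper_bound_py := by
  intro s1 s2 target _ hD
  obtain ⟨hneg, hL, i0, hi0, hinf⟩ := hD
  unfold char_level_longest_common_substring_helper_bound_py
    char_level_longest_common_substring_helper_bound_py_alt
  have hidx : ∀ i ∈ PySem.List.pyRange 0 (s1.toList.length : Int), 0 ≤ i :=
    fun i hi => (PySem.List.mem_pyRange_one.mp hi).1
  rw [pvLoopANeg s1.toList s2.toList target hneg _ hidx]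
  rw [if_pos ⟨hL, (i0 : Int), PySem.List.mem_pyRange_one.mpr ⟨Int.natCast_nonneg i0, by omega⟩,
    by omega, by rw [Int.toNat_natCast]; exact hinf⟩]
  simp only [if_pos (Or.inl (le_of_lt hneg))]
  omega

-- ===== VERDICT (by name: the statement is the Claim_ definition above) =====
theorem char_level_longest_common_substring_helper_bound_py_changed : Claim_changed_char_level_longest_common_substring_helper_bound_py := by
  unfold Claim_changed_char_level_longest_common_substring_helper_bound_py; decide
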